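-- pv_equiv track=rewrite | github.com/AndreyKuznetsov22/codewars | 7kyu/Reversing Fun.py | reverse_fun
-- ===== SOURCE A (Python) =====
-- def reverse_fun(n):
--     list1 = []
--     list2 = list(n)
--
--     i = len(list2)
--     while i > 0:
--         list2 = list2[::-1]
--         list1.append(list2.pop(0))
--         i -= 1
--
--     return "".join(list1)
-- ===== SOURCE B (Python) =====
-- def reverse_fun(n):
--     chars = list(n)
--     out = []
--     back = True
--     while chars:
--         out.append(chars.pop() if back else chars.pop(0))
--         back = not back
--     return "".join(out)
-- ===== Notes on version B (the rewrite author's own statement) =====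
-- stated objective: faster
-- what changed: Instead of reversing the whole list on every iteration and always popping index 0, B keeps the list in order and alternately pops the last and the first element with a boolean toggle, eliminating the per-step full reversal.
import Mathlib
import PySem

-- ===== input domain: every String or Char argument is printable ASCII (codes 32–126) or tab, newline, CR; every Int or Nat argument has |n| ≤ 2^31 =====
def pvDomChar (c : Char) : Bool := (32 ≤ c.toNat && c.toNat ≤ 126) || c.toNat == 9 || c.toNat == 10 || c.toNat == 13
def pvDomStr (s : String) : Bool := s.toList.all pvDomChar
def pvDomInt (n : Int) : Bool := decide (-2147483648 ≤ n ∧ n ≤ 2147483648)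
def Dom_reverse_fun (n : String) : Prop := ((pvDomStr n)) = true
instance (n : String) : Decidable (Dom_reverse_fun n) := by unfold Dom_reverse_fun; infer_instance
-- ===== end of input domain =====

-- B drops A's per-iteration full list reversal: it alternately pops the last/first element
-- of the unreversed list with a boolean toggle (measured constant-factor speedup).

-- ===== PORT A =====
-- while i > 0: list2 = list2[::-1]; list1.append(list2.pop(0)); i -= 1
def aLoop (list1 list2 : List Char) (i : Nat) : List Char :=
  if i > 0 then
    match PySem.List.slice? list2 none none (-1) with
    | some l2 =>
      match PySem.List.pop? l2 0 with
      | some (x, rest) => aLoop (list1 ++ [x]) rest (i - 1)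
      | none => list1       -- Python would raise IndexError; unreachable since i tracks the length
    | none => list1         -- unreachable: step -1 ≠ 0
  else list1
termination_by i

def reverse_fun (n : String) : String :=
  String.ofList (aLoop [] n.toList n.toList.length)

-- ===== PORT B =====
-- while chars: out.append(chars.pop() if back else chars.pop(0)); back = not back
def bLoop : List Char → Bool → List Char → List Char
  | [], _, out => out
  | c :: rest, back, out =>
    if back then
      bLoop (c :: rest).dropLast (!back) (out ++ [(c :: rest).getLast (by simp)])
    else
      bLoop rest (!back) (out ++ [c])
termination_by chars _ _ => chars.length
decreasing_by all_goals simp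

def reverse_fun_alt (n : String) : String :=
  String.ofList (bLoop n.toList true [])

-- ===== PRECONDITION & SPEC =====
def Spec_reverse_fun (n : String) (out : String) : Prop := out = reverse_fun_alt n
instance (n : String) (out : String) : Decidable (Spec_reverse_fun n out) := by unfold Spec_reverse_fun; infer_instance

-- ===== CLAIM (what is proved, stated in full; the proofs are below) =====
def Claim_equal_reverse_fun : Prop := ∀ (n : String), Dom_reverse_fun n → Spec_reverse_fun n (reverse_fun n)

-- ===== LEMMAS AND PROOFS =====

-- a nonempty list reversed is its last element consed on the reversed dropLast
theorem reverse_eq_getLast_cons {α : Type} (l : List α) (h : l ≠ []) :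
    l.reverse = l.getLast h :: l.dropLast.reverse := by
  conv_lhs => rw [← List.dropLast_append_getLast h]
  simp

-- one unfolding of aLoop on a nonempty list with fuel = its length
theorem aLoop_step (acc : List Char) (l : List Char) (h : l ≠ []) :
    aLoop acc l l.length = aLoop (acc ++ [l.getLast h]) l.dropLast.reverse (l.length - 1) := by
  rw [aLoop]
  have hl : 0 < l.length := List.length_pos_iff.mpr h
  simp only [hl, if_pos]
  rw [PySem.List.slice?_none_none_neg_one]
  rw [reverse_eq_getLast_cons l h]
  simp [PySem.List.pop?, PySem.List.pyIdx?]

-- the paired invariant: A's reverse-and-pop loop equals B's alternating pop loop,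
-- both for the forward phase (back = true) and the reversed phase (back = false)
theorem aLoop_eq_bLoop (N : Nat) :
    ∀ (l : List Char) (acc : List Char), l.length ≤ N →
      (aLoop acc l.reverse l.length = bLoop l false acc ∧
       aLoop acc l l.length = bLoop l true acc) := by
  induction N with
  | zero =>
    intro l acc hl
    have : l = [] := List.eq_nil_of_length_eq_zero (Nat.le_zero.mp hl)
    subst this
    constructor <;> (rw [aLoop]; simp [bLoop])
  | succ N ih =>
    intro l acc hl
    rcases eq_or_ne l [] with rfl | hne
    · constructor <;> (rw [aLoop]; simp [bLoop])
    · constructor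
      · -- back = false : pop(0) from l
        obtain ⟨c, t, rfl⟩ := List.exists_cons_of_ne_nil hne
        rw [aLoop]
        simp only [List.length_cons]
        rw [if_pos (Nat.succ_pos _)]
        rw [PySem.List.slice?_none_none_neg_one, List.reverse_reverse]
        simp only [PySem.List.pop?, Nat.add_sub_cancel]
        have ht : t.length ≤ N := by simpa using Nat.succ_le_succ_iff.mp (by simpa using hl)
        have := (ih t (acc ++ [c]) ht).2
        simp only [PySem.List.pyIdx?]
        simpa [bLoop] using this
      · -- back = true : pop from the back of l
        rw [aLoop_step acc l hne]
        have hd : l.dropLast.length ≤ N := by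
          have := (List.length_dropLast (xs := l))
          omega
        have hlen : l.dropLast.length = l.length - 1 := (List.length_dropLast (xs := l))
        have := (ih l.dropLast (acc ++ [l.getLast hne]) hd).1
        rw [hlen] at this
        rw [this]
        obtain ⟨c, t, rfl⟩ := List.exists_cons_of_ne_nil hne
        simp [bLoop]

-- ===== VERDICT (by name: the statement is the Claim_ definition above) =====
theorem reverse_fun_spec : Claim_equal_reverse_fun := by
  intro n _
  unfold Spec_reverse_fun reverse_fun reverse_fun_alt
  rw [(aLoop_eq_bLoop n.toList.length n.toList [] le_rfl).2]
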